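-- pv_equiv track=rewrite | github.com/andrea00mauro00/marine-pollution-tracking | dashboard_consumer/dashboard_consumer.py | is_same_pollutant_type
-- ===== SOURCE A (Python) =====
-- def is_same_pollutant_type(type1, type2):
--     """Verifica se due tipi di inquinanti sono considerati equivalenti"""
--     if type1 == type2:
--         return True
--
--     # Normalizza i tipi per confronto
--     type1 = type1.lower() if type1 else ""
--     type2 = type2.lower() if type2 else ""
--
--     if not type1 or not type2:
--         return False
--
--     # Mappa di sinonimi per tipi di inquinanti
--     synonyms = {
--         "oil": ["oil_spill", "crude_oil", "petroleum", "crude", "spill", "petroleum_spill"],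
--         "chemical": ["chemical_spill", "toxic_chemicals", "toxics", "chemicals", "toxic_spill"],
--         "sewage": ["waste_water", "sewage_discharge", "waste", "wastewater", "discharge"],
--         "plastic": ["microplastics", "plastic_debris", "debris", "trash", "garbage", "waste"],
--         "algae": ["algal_bloom", "red_tide", "bloom", "tide", "algal"]
--     }
--
--     # Controlla se sono sinonimi basandosi sulla mappa
--     for category, types in synonyms.items():
--         if (type1 == category or any(t in type1 for t in types)) and (type2 == category or any(t in type2 for t in types)):
--             return True
--
--     # Approccio basato sulla sovrapposizione di parole (per tipi composti)
--     words1 = set(type1.replace("_", " ").replace("-", " ").split())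
--     words2 = set(type2.replace("_", " ").replace("-", " ").split())
--
--     # Se condividono parole significative, considera come stesso tipo
--     significant_words = words1.intersection(words2) - {"unknown", "pollution", "pollutant", "type"}
--     if significant_words:
--         return True
--
--     return False
-- ===== SOURCE B (Python) =====
-- # Catalogue flattened into (category, pattern, exact?) records: the category name
-- # matches by equality, its synonyms by substring containment.
-- _PATTERNS = []
-- for _c, _syns in [
--     ("oil", ["oil_spill", "crude_oil", "petroleum", "crude", "spill", "petroleum_spill"]),
--     ("chemical", ["chemical_spill", "toxic_chemicals", "toxics", "chemicals", "toxic_spill"]),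
--     ("sewage", ["waste_water", "sewage_discharge", "waste", "wastewater", "discharge"]),
--     ("plastic", ["microplastics", "plastic_debris", "debris", "trash", "garbage", "waste"]),
--     ("algae", ["algal_bloom", "red_tide", "bloom", "tide", "algal"]),
-- ]:
--     _PATTERNS.append((_c, _c, True))
--     for _s in _syns:
--         _PATTERNS.append((_c, _s, False))
--
-- _STOPWORDS = {"unknown", "pollution", "pollutant", "type"}
--
--
-- def _signature(t):
--     """Unified feature set of a normalized type string: tagged category labels
--     plus tagged significant words. Two types are equivalent iff their
--     signatures intersect."""
--     feats = {("cat", c) for c, p, exact in _PATTERNS if (t == p if exact else p in t)}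
--     words = set(t.replace("_", " ").replace("-", " ").split())
--     feats |= {("word", w) for w in words - _STOPWORDS}
--     return feats
--
--
-- def is_same_pollutant_type(type1, type2):
--     if type1 == type2:
--         return True
--     t1 = (type1 or "").lower()
--     t2 = (type2 or "").lower()
--     if not t1 or not t2:
--         return False
--     return not _signature(t1).isdisjoint(_signature(t2))
-- ===== Notes on version B (the rewrite author's own statement) =====
-- stated objective: alternative
-- what changed: A's early-return synonym loop followed by a separate word-overlap fallback becomes one feature-signature function (tagged matching categories from a flattened pattern list plus tagged significant words) and a single set-disjointness test on the two signatures.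
import Mathlib
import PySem

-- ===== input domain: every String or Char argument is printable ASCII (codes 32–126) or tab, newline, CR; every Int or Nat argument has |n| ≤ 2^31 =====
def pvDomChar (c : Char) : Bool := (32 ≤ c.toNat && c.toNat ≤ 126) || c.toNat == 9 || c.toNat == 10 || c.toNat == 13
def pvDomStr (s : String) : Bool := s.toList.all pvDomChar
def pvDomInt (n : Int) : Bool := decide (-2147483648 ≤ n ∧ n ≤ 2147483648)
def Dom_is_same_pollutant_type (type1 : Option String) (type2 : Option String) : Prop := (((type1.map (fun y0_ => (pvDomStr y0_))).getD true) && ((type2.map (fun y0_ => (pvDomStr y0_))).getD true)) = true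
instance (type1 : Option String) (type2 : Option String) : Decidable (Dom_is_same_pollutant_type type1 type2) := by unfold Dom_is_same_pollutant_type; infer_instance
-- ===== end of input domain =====

-- B replaces A's staged checks (early-return loop over the synonym table, then a word-overlap
-- fallback) by one unified feature signature per string (tagged matching categories plus tagged
-- significant words) and a single disjointness test (objective: alternative; no speed claim).

-- ===== PORT A =====
def synA : List (String × List String) :=
  [("oil", ["oil_spill", "crude_oil", "petroleum", "crude", "spill", "petroleum_spill"]),
   ("chemical", ["chemical_spill", "toxic_chemicals", "toxics", "chemicals", "toxic_spill"]),
   ("sewage", ["waste_water", "sewage_discharge", "waste", "wastewater", "discharge"]),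
   ("plastic", ["microplastics", "plastic_debris", "debris", "trash", "garbage", "waste"]),
   ("algae", ["algal_bloom", "red_tide", "bloom", "tide", "algal"])]

def wordsA (t : String) : PySem.Set String :=
  PySem.Set.ofList (PySem.Str.split₀ (PySem.Str.replace (PySem.Str.replace t "_" " ") "-" " "))

-- Python: significant_words = words1 & words2 - {...}; if significant_words: return True; return False
def wordCheckA (t1 t2 : String) : Bool :=
  !(PySem.Set.diff (PySem.Set.inter (wordsA t1) (wordsA t2))
      (PySem.Set.ofList ["unknown", "pollution", "pollutant", "type"])).isEmpty

-- the 'for category, types in synonyms.items(): if … return True' loop, falling through to the word check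
def loopA (t1 t2 : String) : List (String × List String) → Bool
  | [] => wordCheckA t1 t2
  | (c, ts) :: rest =>
      if (t1 == c || ts.any (fun s => PySem.Str.isIn s t1))
         && (t2 == c || ts.any (fun s => PySem.Str.isIn s t2)) then true
      else loopA t1 t2 rest

def is_same_pollutant_type (type1 : Option String) (type2 : Option String) : Bool :=
  if type1 == type2 then true
  else
    let t1 := match type1 with | none => "" | some s => if s == "" then "" else PySem.Str.lower s
    let t2 := match type2 with | none => "" | some s => if s == "" then "" else PySem.Str.lower s
    if t1 == "" || t2 == "" then false
    else loopA t1 t2 synA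

-- ===== PORT B =====
-- the flattened (category, pattern, exact?) records built at module load in Source B
def patternsB : List (String × String × Bool) :=
  [("oil", "oil", true), ("oil", "oil_spill", false), ("oil", "crude_oil", false),
   ("oil", "petroleum", false), ("oil", "crude", false), ("oil", "spill", false),
   ("oil", "petroleum_spill", false),
   ("chemical", "chemical", true), ("chemical", "chemical_spill", false),
   ("chemical", "toxic_chemicals", false), ("chemical", "toxics", false),
   ("chemical", "chemicals", false), ("chemical", "toxic_spill", false),
   ("sewage", "sewage", true), ("sewage", "waste_water", false),
   ("sewage", "sewage_discharge", false), ("sewage", "waste", false),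
   ("sewage", "wastewater", false), ("sewage", "discharge", false),
   ("plastic", "plastic", true), ("plastic", "microplastics", false),
   ("plastic", "plastic_debris", false), ("plastic", "debris", false),
   ("plastic", "trash", false), ("plastic", "garbage", false), ("plastic", "waste", false),
   ("algae", "algae", true), ("algae", "algal_bloom", false), ("algae", "red_tide", false),
   ("algae", "bloom", false), ("algae", "tide", false), ("algae", "algal", false)]

def stopB : List String := ["unknown", "pollution", "pollutant", "type"]

-- _signature(t): tagged matching categories ∪ tagged significant words
def sigB (t : String) : PySem.Set (String × String) :=
  PySem.Set.union
    (PySem.Set.ofList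
      ((patternsB.filter
          (fun e => if e.2.2 then t == e.2.1 else PySem.Str.isIn e.2.1 t)).map
        (fun e => ("cat", e.1))))
    ((PySem.Set.diff
        (PySem.Set.ofList (PySem.Str.split₀ (PySem.Str.replace (PySem.Str.replace t "_" " ") "-" " ")))
        (PySem.Set.ofList stopB)).map (fun w => ("word", w)))

def is_same_pollutant_type_alt (type1 : Option String) (type2 : Option String) : Bool :=
  if type1 == type2 then true
  else
    let t1 := PySem.Str.lower (type1.getD "")
    let t2 := PySem.Str.lower (type2.getD "")
    if t1 == "" || t2 == "" then false
    else !(PySem.Set.isdisjoint (sigB t1) (sigB t2))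

-- ===== PRECONDITION & SPEC =====
def Spec_is_same_pollutant_type (type1 : Option String) (type2 : Option String) (out : Bool) : Prop := out = is_same_pollutant_type_alt type1 type2
instance (type1 : Option String) (type2 : Option String) (out : Bool) : Decidable (Spec_is_same_pollutant_type type1 type2 out) := by unfold Spec_is_same_pollutant_type; infer_instance

-- ===== CLAIM =====
def Claim_equal_is_same_pollutant_type : Prop := ∀ (type1 : Option String) (type2 : Option String), Dom_is_same_pollutant_type type1 type2 → Spec_is_same_pollutant_type type1 type2 (is_same_pollutant_type type1 type2)

-- ===== LEMMAS AND PROOFS =====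

-- one synonym-table entry test (proofs only)
def pvMatch (t : String) (e : String × List String) : Bool :=
  t == e.1 || e.2.any (fun s => PySem.Str.isIn s t)

-- one flattened-record test (proofs only)
def pvMatchP (t : String) (e : String × String × Bool) : Bool :=
  if e.2.2 then t == e.2.1 else PySem.Str.isIn e.2.1 t

def pvExpand (p : String × List String) : List (String × String × Bool) :=
  (p.1, p.1, true) :: p.2.map (fun s => (p.1, s, false))

theorem patternsB_eq : patternsB = synA.flatMap pvExpand := by decide

theorem loopA_any (t1 t2 : String) (l : List (String × List String)) :
    loopA t1 t2 l = (l.any (fun e => pvMatch t1 e && pvMatch t2 e) || wordCheckA t1 t2) := by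
  induction l with
  | nil => simp [loopA]
  | cons e rest ih =>
    obtain ⟨c, ts⟩ := e
    simp only [loopA, List.any_cons, ih, pvMatch]
    cases h : ((t1 == c || ts.any (fun s => PySem.Str.isIn s t1))
        && (t2 == c || ts.any (fun s => PySem.Str.isIn s t2))) <;> simp

-- matching some expanded record of p is exactly matching the table entry p
theorem expand_match (t : String) (p : String × List String) :
    (∃ e ∈ pvExpand p, pvMatchP t e = true) ↔ pvMatch t p = true := by
  obtain ⟨c, ts⟩ := p
  simp only [pvExpand, pvMatch, List.mem_cons, List.mem_map, pvMatchP, Bool.or_eq_true,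
    List.any_eq_true]
  constructor
  · rintro ⟨e, (rfl | ⟨s, hs, rfl⟩), hm⟩
    · exact Or.inl (by simpa using hm)
    · exact Or.inr ⟨s, hs, by simpa using hm⟩
  · rintro (h | ⟨s, hs, h⟩)
    · exact ⟨(c, c, true), Or.inl rfl, by simpa using h⟩
    · exact ⟨(c, s, false), Or.inr ⟨s, hs, rfl⟩, by simpa using h⟩

theorem expand_fst {p : String × List String} {e : String × String × Bool}
    (h : e ∈ pvExpand p) : e.1 = p.1 := by
  obtain ⟨c, ts⟩ := p
  simp only [pvExpand, List.mem_cons, List.mem_map] at h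
  rcases h with rfl | ⟨s, _, rfl⟩ <;> rfl

def pvWords (t : String) : List String :=
  PySem.Str.split₀ (PySem.Str.replace (PySem.Str.replace t "_" " ") "-" " ")

theorem mem_sigB (t : String) (x : String × String) :
    x ∈ sigB t ↔
      ((∃ p ∈ synA, pvMatch t p = true ∧ x = ("cat", p.1)) ∨
       (∃ w, w ∈ PySem.Set.ofList (pvWords t) ∧ w ∉ stopB ∧ x = ("word", w))) := by
  simp only [sigB, PySem.Set.mem_union, PySem.Set.mem_ofList, List.mem_map, List.mem_filter,
    patternsB_eq, List.mem_flatMap, PySem.Set.mem_diff, pvWords]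
  constructor
  · rintro (⟨e, ⟨⟨p, hp, he⟩, hm⟩, rfl⟩ | ⟨w, ⟨hw, hs⟩, rfl⟩)
    · left
      refine ⟨p, hp, (expand_match t p).mp ⟨e, he, hm⟩, ?_⟩
      simp [expand_fst he]
    · exact Or.inr ⟨w, hw, hs, rfl⟩
  · rintro (⟨p, hp, hm, rfl⟩ | ⟨w, hw, hs, rfl⟩)
    · left
      obtain ⟨e, he, hme⟩ := (expand_match t p).mpr hm
      exact ⟨e, ⟨⟨p, hp, he⟩, hme⟩, by simp [expand_fst he]⟩
    · exact Or.inr ⟨w, ⟨hw, hs⟩, rfl⟩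

theorem synA_keys_nodup : (synA.map Prod.fst).Nodup := by decide

theorem wordCheckA_iff (t1 t2 : String) :
    wordCheckA t1 t2 = true ↔
      ∃ w, w ∈ PySem.Set.ofList (pvWords t1) ∧ w ∈ PySem.Set.ofList (pvWords t2) ∧ w ∉ stopB := by
  simp only [wordCheckA, wordsA, Bool.not_eq_true', List.isEmpty_eq_false_iff_exists_mem,
    PySem.Set.mem_diff, PySem.Set.mem_inter, PySem.Set.mem_ofList, pvWords, stopB]
  constructor
  · rintro ⟨w, ⟨⟨h1, h2⟩, hs⟩⟩; exact ⟨w, h1, h2, by simpa using hs⟩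
  · rintro ⟨w, h1, h2, hs⟩; exact ⟨w, ⟨h1, h2⟩, by simpa using hs⟩

theorem disjoint_eq (t1 t2 : String) :
    (!(PySem.Set.isdisjoint (sigB t1) (sigB t2))) =
      (synA.any (fun e => pvMatch t1 e && pvMatch t2 e) || wordCheckA t1 t2) := by
  have h : (!(PySem.Set.isdisjoint (sigB t1) (sigB t2))) = true ↔
      ((synA.any (fun e => pvMatch t1 e && pvMatch t2 e) || wordCheckA t1 t2) = true) := by
    rw [Bool.not_eq_true', Bool.eq_false_iff, Ne, PySem.Set.isdisjoint_iff]
    push Not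
    simp only [Bool.or_eq_true, List.any_eq_true, Bool.and_eq_true, wordCheckA_iff]
    constructor
    · rintro ⟨x, hx1, hx2⟩
      rw [mem_sigB] at hx1 hx2
      rcases hx1 with ⟨p1, hp1, hm1, rfl⟩ | ⟨w1, hw1, hs1, rfl⟩
      · rcases hx2 with ⟨p2, hp2, hm2, he⟩ | ⟨w2, _, _, he⟩
        · left
          have hk : p1.1 = p2.1 := by
            have := congrArg Prod.snd he; simpa using this
          have : p1 = p2 := List.inj_on_of_nodup_map synA_keys_nodup hp1 hp2 hk
          exact ⟨p1, hp1, hm1, this ▸ hm2⟩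
        · exact absurd (congrArg Prod.fst he) (by simp)
      · rcases hx2 with ⟨p2, _, _, he⟩ | ⟨w2, hw2, _, he⟩
        · exact absurd (congrArg Prod.fst he) (by simp)
        · right
          have : w1 = w2 := by have := congrArg Prod.snd he; simpa using this
          exact ⟨w1, hw1, this ▸ hw2, hs1⟩
    · rintro (⟨p, hp, hm1, hm2⟩ | ⟨w, hw1, hw2, hs⟩)
      · exact ⟨("cat", p.1), (mem_sigB _ _).mpr (Or.inl ⟨p, hp, hm1, rfl⟩),
          (mem_sigB _ _).mpr (Or.inl ⟨p, hp, hm2, rfl⟩)⟩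
      · exact ⟨("word", w), (mem_sigB _ _).mpr (Or.inr ⟨w, hw1, hs, rfl⟩),
          (mem_sigB _ _).mpr (Or.inr ⟨w, hw2, hs, rfl⟩)⟩
  cases hb : (!(PySem.Set.isdisjoint (sigB t1) (sigB t2))) <;>
    cases hc : (synA.any (fun e => pvMatch t1 e && pvMatch t2 e) || wordCheckA t1 t2) <;> simp_all

-- A's and B's normalizations agree: (s or "").lower() = (s.lower() if s else "")
theorem norm_eq (o : Option String) :
    (match o with | none => "" | some s => if s == "" then "" else PySem.Str.lower s) =
      PySem.Str.lower (o.getD "") := by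
  cases o with
  | none => rfl
  | some s =>
    simp only [Option.getD_some]
    by_cases h : s = ""
    · subst h; simp; decide
    · simp [h]

-- ===== VERDICT =====
theorem is_same_pollutant_type_spec : Claim_equal_is_same_pollutant_type := by
  intro type1 type2 _
  unfold Spec_is_same_pollutant_type is_same_pollutant_type is_same_pollutant_type_alt
  simp only [norm_eq, loopA_any, disjoint_eq]
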